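-- pv_equiv track=rewrite | github.com/jdanray/leetcode | divisibilityArray.py | divisibilityArray
-- ===== SOURCE A (Python) =====
-- def divisibilityArray(word, m):
-- 	pre = 0
-- 	res = []
-- 	for d in word:
-- 		pre = (pre * 10 + int(d)) % m
--
-- 		if pre == 0:
-- 			res.append(1)
-- 		else:
-- 			res.append(0)
--
-- 	return res
-- ===== SOURCE B (Python) =====
-- def divisibilityArray(word, m):
--     digits = [int(c) for c in word]
--     return [1 if sum(digits[j] * pow(10, i - j, m) for j in range(i + 1)) % m == 0 else 0
--             for i in range(len(digits))]
-- ===== Notes on version B (the rewrite author's own statement) =====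
-- stated objective: alternative
-- what changed: B drops A's maintained running remainder entirely: each index is tested independently by the stateless positional formula sum(digit_j * pow(10, i-j, m)) % m == 0, a direct per-prefix computation instead of an accumulator state machine.
import Mathlib
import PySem

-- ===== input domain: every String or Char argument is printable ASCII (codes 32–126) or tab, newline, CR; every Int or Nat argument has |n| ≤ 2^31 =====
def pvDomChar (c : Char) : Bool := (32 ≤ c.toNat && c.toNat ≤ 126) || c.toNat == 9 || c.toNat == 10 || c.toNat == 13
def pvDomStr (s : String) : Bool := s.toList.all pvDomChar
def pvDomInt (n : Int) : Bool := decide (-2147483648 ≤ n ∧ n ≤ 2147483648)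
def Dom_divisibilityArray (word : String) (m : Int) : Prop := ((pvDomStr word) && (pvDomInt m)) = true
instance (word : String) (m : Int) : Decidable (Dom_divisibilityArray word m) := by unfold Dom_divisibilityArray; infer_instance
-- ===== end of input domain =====

-- B replaces A's running-remainder state machine by a stateless per-index formula: each prefix is tested via the
-- positional sum Σ digit_j · pow(10, i-j, m) — a different (quadratic) algorithm, no maintained state; no speed claim.

-- ===== PORT A =====
-- int(d) for a single character; none (ValueError) is excluded by Pre_, .getD 0 is never reached there
def pvDig (d : Char) : Int := (PySem.Int.ofChars? [d]).getD 0

def divisibilityArray (word : String) (m : Int) : List Int :=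
  (word.toList.foldl
    (fun (st : Int × List Int) d =>
      let pre := PySem.Int.mod (st.1 * 10 + pvDig d) m
      (pre, st.2 ++ [if pre == 0 then (1 : Int) else 0]))
    (0, [])).2

-- ===== PORT B =====
def divisibilityArray_alt (word : String) (m : Int) : List Int :=
  let digits := word.toList.map pvDig
  (PySem.List.pyRange 0 (PySem.List.len digits) 1).map (fun i =>
    if PySem.Int.mod
        ((PySem.List.pyRange 0 (i + 1) 1).foldl
          (fun s j => s + PySem.List.pyGetD digits j 0 * PySem.Int.powMod 10 (i - j).toNat m) 0) m == 0
    then (1 : Int) else 0)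

-- ===== PRECONDITION & SPEC =====
-- Pre_ excludes exactly the inputs where the Python A raises: any non-digit character (ValueError from int(d)), and m = 0 on a nonempty word (ZeroDivisionError; an empty word returns [] for every m).
def Pre_divisibilityArray (word : String) (m : Int) : Prop :=
  (m ≠ 0 ∨ word.toList = []) ∧ word.toList.all (fun c => decide ('0' ≤ c) && decide (c ≤ '9')) = true
instance (word : String) (m : Int) : Decidable (Pre_divisibilityArray word m) := by
  unfold Pre_divisibilityArray; infer_instance

def pvWitness_divisibilityArray : String × Int := ("42", 3)

def Spec_divisibilityArray (word : String) (m : Int) (out : List Int) : Prop := out = divisibilityArray_alt word m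
instance (word : String) (m : Int) (out : List Int) : Decidable (Spec_divisibilityArray word m out) := by unfold Spec_divisibilityArray; infer_instance

-- ===== CLAIM (what is proved, stated in full; the proofs are below) =====
def Claim_equal_divisibilityArray : Prop := ∀ (word : String) (m : Int), Dom_divisibilityArray word m → Pre_divisibilityArray word m → Spec_divisibilityArray word m (divisibilityArray word m)

-- ===== LEMMAS AND PROOFS =====

-- Horner prefix value of a digit string, starting from accumulated value v
def pvW (v : Int) (cs : List Char) : Int := cs.foldl (fun a c => a * 10 + pvDig c) v

-- the list of exact prefix values of cs starting from accumulated value v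
def pvVals (cs : List Char) (v : Int) : List Int :=
  match cs with
  | [] => []
  | c :: t => (v * 10 + pvDig c) :: pvVals t (v * 10 + pvDig c)

-- Python's % is congruence mod m
theorem pvMod_congr_dvd (a b m : Int) (h : m ∣ a - b) : PySem.Int.mod a m = PySem.Int.mod b m := by
  unfold PySem.Int.mod
  obtain ⟨k, hk⟩ := h
  have : a = b + m * k := by linarith
  rw [this, Int.add_mul_fmod_self_left]

theorem pvMod_sub_self (x m : Int) : m ∣ PySem.Int.mod x m - x := by
  have h := Int.fmod_add_mul_fdiv x m
  exact ⟨-(x.fdiv m), by unfold PySem.Int.mod; linarith⟩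

-- ===== A-side characterisation: A's fold yields the divisibility bits of the exact prefix values =====
theorem pvA_fold (cs : List Char) (m v p : Int) (acc : List Int)
    (hp : p = PySem.Int.mod v m) :
    (cs.foldl (fun (st : Int × List Int) d =>
        let pre := PySem.Int.mod (st.1 * 10 + pvDig d) m
        (pre, st.2 ++ [if pre == 0 then (1 : Int) else 0])) (p, acc)).2
      = acc ++ (pvVals cs v).map (fun w => if PySem.Int.mod w m == 0 then (1 : Int) else 0) := by
  induction cs generalizing v p acc with
  | nil => simp [pvVals]
  | cons c t ih =>
    have key : PySem.Int.mod (p * 10 + pvDig c) m = PySem.Int.mod (v * 10 + pvDig c) m := by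
      rw [hp]; exact pvMod_congr_dvd _ _ _ (by
        have := pvMod_sub_self v m
        obtain ⟨k, hk⟩ := this
        exact ⟨k * 10, by linarith⟩)
    simp only [List.foldl_cons, pvVals, List.map_cons, key]
    rw [ih (v * 10 + pvDig c) _ _ rfl]
    simp [List.append_assoc]

-- pvVals as the list of Horner values of the prefixes
theorem pvVals_eq (cs : List Char) (v : Int) :
    pvVals cs v = (List.range cs.length).map (fun k => pvW v (cs.take (k + 1))) := by
  induction cs generalizing v with
  | nil => simp [pvVals]
  | cons c t ih =>
    simp only [pvVals, List.length_cons, List.range_succ_eq_map, List.map_cons, List.map_map]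
    rw [List.cons.injEq]
    refine ⟨by simp [pvW], ?_⟩
    rw [ih (v * 10 + pvDig c)]
    rfl

-- ===== B-side characterisation =====

-- dropping the inner modular reductions does not change the sum mod m
theorem pvSum_congr (l : List Nat) (g : Nat → Int) (pvE : Nat → Nat) (m : Int) :
    m ∣ (l.map (fun j => g j * PySem.Int.powMod 10 (pvE j) m)).sum
        - (l.map (fun j => g j * 10 ^ pvE j)).sum := by
  induction l with
  | nil => simp
  | cons a t ih =>
    simp only [List.map_cons, List.sum_cons]
    have h1 : m ∣ g a * PySem.Int.powMod 10 (pvE a) m - g a * 10 ^ pvE a := by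
      rw [PySem.Int.powMod_eq, ← mul_sub]
      exact Dvd.dvd.mul_left (pvMod_sub_self _ m) (g a)
    have : (g a * PySem.Int.powMod 10 (pvE a) m + (t.map (fun j => g j * PySem.Int.powMod 10 (pvE j) m)).sum)
        - (g a * 10 ^ pvE a + (t.map (fun j => g j * 10 ^ pvE j)).sum)
        = (g a * PySem.Int.powMod 10 (pvE a) m - g a * 10 ^ pvE a)
          + ((t.map (fun j => g j * PySem.Int.powMod 10 (pvE j) m)).sum - (t.map (fun j => g j * 10 ^ pvE j)).sum) := by ring
    rw [this]
    exact Int.dvd_add h1 ih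

-- the exact positional sum of the first k+1 digits is the Horner value of that prefix
theorem pvHorner (cs : List Char) (k : Nat) (hk : k < cs.length) :
    ((List.range (k + 1)).map (fun j => pvDig cs[j]! * 10 ^ (k - j))).sum = pvW 0 (cs.take (k + 1)) := by
  induction k with
  | zero =>
    have h0 : 0 < cs.length := hk
    simp [pvW, List.take_add_one, List.getElem!_eq_getElem?_getD, List.getElem?_eq_getElem h0]
  | succ k ih =>
    have hk' : k < cs.length := by omega
    have hsplit : List.range (k + 1 + 1) = List.range (k + 1) ++ [k + 1] := List.range_succ
    rw [hsplit, List.map_append, List.sum_append]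
    have hshift : (List.range (k + 1)).map (fun j => pvDig cs[j]! * 10 ^ (k + 1 - j))
        = (List.range (k + 1)).map (fun j => 10 * (pvDig cs[j]! * 10 ^ (k - j))) := by
      apply List.map_congr_left
      intro j hj
      have : j < k + 1 := List.mem_range.mp hj
      have : k + 1 - j = (k - j) + 1 := by omega
      rw [this]; ring
    rw [hshift, List.sum_map_mul_left, ih hk']
    have htake : cs.take (k + 1 + 1) = cs.take (k + 1) ++ [cs[k + 1]] := by
      rw [List.take_add_one, List.getElem?_eq_getElem hk]
      rfl
    simp only [htake, pvW, List.foldl_append, List.foldl_cons, List.foldl_nil,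
      List.map_cons, List.map_nil, List.sum_cons, List.sum_nil,
      List.getElem!_eq_getElem?_getD, List.getElem?_eq_getElem hk]
    simp
    ring

-- B's element at index k equals the divisibility bit of the k+1-prefix's Horner value
theorem pvB_elem (cs : List Char) (m : Int) (k : Nat) (hk : k < cs.length) :
    PySem.Int.mod
      ((PySem.List.pyRange 0 ((k : Int) + 1) 1).foldl
        (fun s j => s + PySem.List.pyGetD (cs.map pvDig) j 0 * PySem.Int.powMod 10 ((k : Int) - j).toNat m) 0) m
    = PySem.Int.mod (pvW 0 (cs.take (k + 1))) m := by
  rw [PySem.List.pyRange_one]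
  have hn : ((k : Int) + 1 - 0).toNat = k + 1 := by omega
  rw [hn, List.foldl_map, PySem.List.foldl_add, zero_add]
  have hmap : (List.range (k + 1)).map
        (fun (j : Nat) => PySem.List.pyGetD (cs.map pvDig) (0 + (j : Int)) 0 * PySem.Int.powMod 10 (((k : Int) - (0 + (j : Int))).toNat) m)
      = (List.range (k + 1)).map (fun j => pvDig cs[j]! * PySem.Int.powMod 10 (k - j) m) := by
    apply List.map_congr_left
    intro j hj
    have hjk : j < k + 1 := List.mem_range.mp hj
    have hjlen : j < cs.length := by omega
    have h1 : ((k : Int) - (0 + (j : Int))).toNat = k - j := by omega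
    rw [h1, zero_add, PySem.List.pyGetD_natCast, List.getD_eq_getElem _ _ (by simpa using hjlen),
      List.getElem_map, List.getElem!_eq_getElem?_getD, List.getElem?_eq_getElem hjlen]
    rfl
  rw [hmap]
  rw [pvMod_congr_dvd _ ((List.range (k + 1)).map (fun j => pvDig cs[j]! * 10 ^ (k - j))).sum m
    (pvSum_congr (List.range (k + 1)) (fun j => pvDig cs[j]!) (fun j => k - j) m)]
  rw [pvHorner cs k hk]

-- ===== VERDICT (by name: the statement is the Claim_ definition above) =====
theorem divisibilityArray_spec : Claim_equal_divisibilityArray := by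
  intro word m _ _
  unfold Spec_divisibilityArray divisibilityArray divisibilityArray_alt
  rw [pvA_fold word.toList m 0 0 [] (by simp [PySem.Int.mod]), List.nil_append, pvVals_eq]
  simp only [PySem.List.len_eq, List.length_map]
  rw [PySem.List.pyRange_one]
  simp only [Int.sub_zero, Int.toNat_natCast, List.map_map, List.map_map]
  apply List.map_congr_left
  intro k hk
  have hklen : k < word.toList.length := List.mem_range.mp hk
  simp only [Function.comp_apply, zero_add]
  rw [pvB_elem word.toList m k hklen]
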